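-- pv_equiv track=rewrite | github.com/MernaHesham10/Blast | Blast.py | FindHits
-- ===== SOURCE A (Python) =====
-- def FindHits(protien, seeds, wordLength):
--     hitsList = []
--     for i in range(len(seeds)):
--         (wordTemp, _, _, _) = seeds[i]
--         for j in range(len(protien)):
--             if protien[j:j + wordLength] == wordTemp:
--                 hitsList.append((i, j))
--     return hitsList
-- ===== SOURCE B (Python) =====
-- def FindHits(protien, seeds, wordLength):
--     # Build a hash index: each window substring -> ascending list of start positions.
--     index = {}
--     for j in range(len(protien)):
--         index.setdefault(protien[j:j + wordLength], []).append(j)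
--     hitsList = []
--     for i, (wordTemp, _, _, _) in enumerate(seeds):
--         for j in index.get(wordTemp, []):
--             hitsList.append((i, j))
--     return hitsList
-- ===== Notes on version B (the rewrite author's own statement) =====
-- stated objective: faster
-- what changed: B builds a hash index mapping each window substring of the protein to its list of start positions once, then answers every seed by a single dictionary lookup, instead of rescanning the whole protein for every seed.
import Mathlib
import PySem

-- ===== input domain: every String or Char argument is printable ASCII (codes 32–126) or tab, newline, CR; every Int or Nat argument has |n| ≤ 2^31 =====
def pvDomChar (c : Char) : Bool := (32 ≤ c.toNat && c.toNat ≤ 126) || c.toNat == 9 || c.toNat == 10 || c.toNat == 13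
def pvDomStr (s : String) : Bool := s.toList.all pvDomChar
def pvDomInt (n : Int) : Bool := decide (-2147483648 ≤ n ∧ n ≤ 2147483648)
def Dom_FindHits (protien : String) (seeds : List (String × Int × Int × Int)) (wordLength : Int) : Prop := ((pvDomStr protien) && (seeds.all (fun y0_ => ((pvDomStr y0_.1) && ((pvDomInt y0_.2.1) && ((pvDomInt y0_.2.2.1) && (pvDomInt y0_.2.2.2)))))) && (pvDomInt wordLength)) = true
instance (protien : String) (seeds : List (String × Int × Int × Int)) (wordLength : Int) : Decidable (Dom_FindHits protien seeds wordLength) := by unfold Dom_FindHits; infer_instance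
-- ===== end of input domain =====

-- B replaces A's rescan of the whole protein per seed by a substring→positions index built once (objective: faster).

-- ===== PORT A =====
def FindHits (protien : String) (seeds : List (String × Int × Int × Int)) (wordLength : Int) : List (Int × Int) :=
  (PySem.List.pyRange 0 (seeds.length : Int) 1).foldl
    (fun hitsList i =>
      let wordTemp := (PySem.List.pyGetD seeds i ("", 0, 0, 0)).1
      (PySem.List.pyRange 0 (protien.toList.length : Int) 1).foldl
        (fun hitsList j =>
          if PySem.Str.slice protien (some j) (some (j + wordLength)) == wordTemp
          then hitsList ++ [(i, j)] else hitsList)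
        hitsList)
    []

-- ===== PORT B =====
def FindHits_alt (protien : String) (seeds : List (String × Int × Int × Int)) (wordLength : Int) : List (Int × Int) :=
  let index : PySem.Dict String (List Int) :=
    (PySem.List.pyRange 0 (protien.toList.length : Int) 1).foldl
      (fun d j => d.modify (PySem.Str.slice protien (some j) (some (j + wordLength))) [] (· ++ [j]))
      PySem.Dict.empty
  (PySem.List.enumerate seeds 0).foldl
    (fun hitsList p => hitsList ++ (index.getD p.2.1 []).map (fun j => (p.1, j)))
    []

-- ===== PRECONDITION & SPEC =====
def Spec_FindHits (protien : String) (seeds : List (String × Int × Int × Int)) (wordLength : Int) (out : List (Int × Int)) : Prop := out = FindHits_alt protien seeds wordLength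
instance (protien : String) (seeds : List (String × Int × Int × Int)) (wordLength : Int) (out : List (Int × Int)) : Decidable (Spec_FindHits protien seeds wordLength out) := by unfold Spec_FindHits; infer_instance

-- ===== CLAIM (what is proved, stated in full; the proofs are below) =====
def Claim_equal_FindHits : Prop := ∀ (protien : String) (seeds : List (String × Int × Int × Int)) (wordLength : Int), Dom_FindHits protien seeds wordLength → Spec_FindHits protien seeds wordLength (FindHits protien seeds wordLength)

-- ===== LEMMAS AND PROOFS =====

-- B's index looked up at w is exactly the ascending list of window starts whose window equals w.
theorem FindHits_index_getD (protien : String) (wordLength : Int) (w : String) :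
    (((PySem.List.pyRange 0 (protien.toList.length : Int) 1).foldl
      (fun d j => d.modify (PySem.Str.slice protien (some j) (some (j + wordLength))) [] (· ++ [j]))
      PySem.Dict.empty).getD w [])
    = (PySem.List.pyRange 0 (protien.toList.length : Int) 1).filter
        (fun j => PySem.Str.slice protien (some j) (some (j + wordLength)) == w) := by
  rw [show ((PySem.List.pyRange 0 (protien.toList.length : Int) 1).foldl
      (fun d j => d.modify (PySem.Str.slice protien (some j) (some (j + wordLength))) [] (· ++ [j]))
      PySem.Dict.empty)
    = (((PySem.List.pyRange 0 (protien.toList.length : Int) 1).map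
        (fun j => (PySem.Str.slice protien (some j) (some (j + wordLength)), j))).foldl
      (fun d p => d.modify p.1 [] (· ++ [p.2])) PySem.Dict.empty) from (by rw [List.foldl_map])]
  rw [PySem.Dict.getD_foldl_modify_append, PySem.Dict.getD_empty]
  rw [List.filter_map, List.map_map]
  simp [Function.comp_def]

-- ===== VERDICT (by name: the statement is the Claim_ definition above) =====
theorem FindHits_spec : Claim_equal_FindHits := by
  intro protien seeds wordLength _
  unfold Spec_FindHits FindHits FindHits_alt
  rw [PySem.List.enumerate_eq_map_pyRange (d := ("", 0, 0, 0)), List.foldl_map]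
  apply PySem.List.foldl_congr_mem
  intro acc i hi
  simp only []
  rw [PySem.List.foldl_append_if, FindHits_index_getD]
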